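-- pv_equiv track=rewrite | github.com/nick-silantro/substrate-test | _system/scripts/update-entity.py | remove_meta_attr
-- ===== SOURCE A (Python) =====
-- def remove_meta_attr(content, attr_name):
--     """Remove an attribute entirely from YAML content, including multi-line continuation."""
--     lines = content.rstrip('\n').split('\n')
--     new_lines = []
--     skip_continuation = False
--     i = 0
--     while i < len(lines):
--         line = lines[i]
--         if skip_continuation:
--             if line.strip() == "" or line[0] in (' ', '\t'):
--                 i += 1
--                 continue
--             else:
--                 skip_continuation = False
--         if line.startswith(f"{attr_name}:") and not line.startswith(f"{attr_name}s:"):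
--             skip_continuation = True
--             i += 1
--             continue
--         new_lines.append(line)
--         i += 1
--     return '\n'.join(new_lines) + '\n'
-- ===== SOURCE B (Python) =====
-- def remove_meta_attr(content, attr_name):
--     """Remove an attribute entirely from YAML content, including multi-line continuation."""
--     lines = content.rstrip('\n').split('\n')
--     key = attr_name + ":"
--     key_s = attr_name + "s:"
--
--     def is_attr(l):
--         return l.startswith(key) and not l.startswith(key_s)
--
--     def follows(l):
--         # a continuation line that does not itself open an attribute
--         return (l.strip() == "" or l[0] in (' ', '\t')) and not is_attr(l)
--
--     # stage 1: partition the lines into blocks = a header line plus its continuation run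
--     blocks = []
--     i, n = 0, len(lines)
--     while i < n:
--         j = i + 1
--         while j < n and follows(lines[j]):
--             j += 1
--         blocks.append(lines[i:j])
--         i = j
--     # stage 2: keep only the blocks whose header is not the attribute
--     kept = [line for b in blocks if not is_attr(b[0]) for line in b]
--     return '\n'.join(kept) + '\n'
-- ===== Notes on version B (the rewrite author's own statement) =====
-- stated objective: alternative
-- what changed: A's single pass threading a skip_continuation flag is replaced by two staged passes: first partition the lines into blocks (a header line plus its continuation run, found by an inner scan), then filter out whole blocks whose header opens the attribute and join the rest.
import Mathlib
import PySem

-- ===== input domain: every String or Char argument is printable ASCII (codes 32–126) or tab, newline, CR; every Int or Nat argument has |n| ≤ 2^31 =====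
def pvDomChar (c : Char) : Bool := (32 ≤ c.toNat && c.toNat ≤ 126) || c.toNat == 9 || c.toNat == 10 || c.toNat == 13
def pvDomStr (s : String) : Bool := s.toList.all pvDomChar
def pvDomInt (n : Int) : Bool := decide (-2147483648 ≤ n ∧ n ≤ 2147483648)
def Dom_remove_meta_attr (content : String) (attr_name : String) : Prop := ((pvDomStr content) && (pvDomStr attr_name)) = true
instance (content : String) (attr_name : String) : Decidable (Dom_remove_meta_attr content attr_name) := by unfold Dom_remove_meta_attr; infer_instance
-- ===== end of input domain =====

-- B replaces A's skip_continuation flag state machine by two staged passes: partition the lines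
-- into header+continuation blocks, then filter out whole blocks by their header; objective: alternative.


-- content.rstrip('\n') — hand port (PySem has no rstrip-with-chars); exact: drops exactly the trailing '\n' run
def pvRstripNl (cs : List Char) : List Char := (cs.reverse.dropWhile (· == '\n')).reverse

-- `line.strip() == "" or line[0] in (' ', '\t')` (short-circuit: line[0] only read on a nonempty line)
def pvIsCont (line : List Char) : Bool :=
  (PySem.Chars.strip line == []) || (PySem.List.pyGet? line 0 == some ' ') || (PySem.List.pyGet? line 0 == some '\t')

-- ===== PORT A =====
-- A's while loop over lines with the skip_continuation flag, transliterated as recursion on the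
-- remaining lines carrying the flag; branch order as in A (skip-branch first, falling through
-- to the attribute test when the continuation run breaks).
def pvGoA (key keyS : List Char) : List (List Char) → Bool → List (List Char)
  | [], _ => []
  | line :: rest, skip =>
    if skip && pvIsCont line then pvGoA key keyS rest true
    else if PySem.Chars.startswith line key && !PySem.Chars.startswith line keyS then
      pvGoA key keyS rest true
    else line :: pvGoA key keyS rest false

def remove_meta_attr (content : String) (attr_name : String) : String :=
  let lines := (PySem.Chars.split? (pvRstripNl content.toList) ['\n']).getD []
  let key := attr_name.toList ++ [':']
  let keyS := attr_name.toList ++ ['s', ':']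
  let new_lines := pvGoA key keyS lines false
  String.ofList (PySem.Chars.join ['\n'] new_lines ++ ['\n'])

-- ===== PORT B =====
-- Source B's is_attr / follows helpers
def pvIsAttr (key keyS line : List Char) : Bool :=
  PySem.Chars.startswith line key && !PySem.Chars.startswith line keyS

def pvFollows (key keyS line : List Char) : Bool :=
  pvIsCont line && !pvIsAttr key keyS line

-- Source B's stage 1: the outer while loop producing `blocks`; the inner `while j < n and follows`
-- scan is takeWhile/dropWhile over the remaining lines (same scan, same split point)
def pvBlocks (key keyS : List Char) : List (List Char) → List (List (List Char))
  | [] => []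
  | l :: rest =>
    (l :: rest.takeWhile (pvFollows key keyS)) ::
      pvBlocks key keyS (rest.dropWhile (pvFollows key keyS))
termination_by ls => ls.length
decreasing_by exact Nat.lt_succ_of_le (List.length_dropWhile_le _ _)

def remove_meta_attr_alt (content : String) (attr_name : String) : String :=
  let lines := (PySem.Chars.split? (pvRstripNl content.toList) ['\n']).getD []
  let key := attr_name.toList ++ [':']
  let keyS := attr_name.toList ++ ['s', ':']
  let blocks := pvBlocks key keyS lines
  -- stage 2: `[line for b in blocks if not is_attr(b[0]) for line in b]`
  let kept := (blocks.filter (fun b => !pvIsAttr key keyS (b.headD []))).flatten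
  String.ofList (PySem.Chars.join ['\n'] kept ++ ['\n'])

-- ===== PRECONDITION & SPEC =====
def Spec_remove_meta_attr (content : String) (attr_name : String) (out : String) : Prop := out = remove_meta_attr_alt content attr_name
instance (content : String) (attr_name : String) (out : String) : Decidable (Spec_remove_meta_attr content attr_name out) := by unfold Spec_remove_meta_attr; infer_instance

-- ===== CLAIM (what is proved, stated in full; the proofs are below) =====
def Claim_equal_remove_meta_attr : Prop := ∀ (content : String) (attr_name : String), Dom_remove_meta_attr content attr_name → Spec_remove_meta_attr content attr_name (remove_meta_attr content attr_name)

-- ===== LEMMAS AND PROOFS =====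

-- B's kept list, as a function of the line list
def pvFlat (key keyS : List Char) (ls : List (List Char)) : List (List Char) :=
  ((pvBlocks key keyS ls).filter (fun b => !pvIsAttr key keyS (b.headD []))).flatten

theorem pvFlat_nil (key keyS : List Char) : pvFlat key keyS [] = [] := by
  unfold pvFlat; rw [pvBlocks]; rfl

-- friendly unfolding of pvFlat on a cons
theorem pvFlat_cons (key keyS l : List Char) (rest : List (List Char)) :
    pvFlat key keyS (l :: rest) =
      (if pvIsAttr key keyS l then ([] : List (List Char))
       else l :: rest.takeWhile (pvFollows key keyS)) ++
        pvFlat key keyS (rest.dropWhile (pvFollows key keyS)) := by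
  unfold pvFlat
  rw [pvBlocks]
  by_cases h : pvIsAttr key keyS l = true <;> simp [h]

-- a run of `follows` lines passes through A's no-skip loop unchanged
theorem pvGoA_keepRun (key keyS : List Char) (t d : List (List Char))
    (ht : ∀ l ∈ t, pvFollows key keyS l = true) :
    pvGoA key keyS (t ++ d) false = t ++ pvGoA key keyS d false := by
  induction t with
  | nil => rfl
  | cons l t ih =>
    have h := ht l (List.mem_cons_self ..)
    have hattr : pvIsAttr key keyS l = false := by
      unfold pvFollows at h; simp at h; exact h.2
    rw [List.cons_append, pvGoA]
    unfold pvIsAttr at hattr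
    simp [hattr, ih (fun l hl => ht l (List.mem_cons_of_mem _ hl))]

-- main invariant: A's flag machine equals B's block pass (flag clear), and with the flag set
-- A first consumes the rest of the block that B's dropWhile removed.
theorem pvGoA_eq_pvFlat (key keyS : List Char) :
    ∀ (n : ℕ) (ls : List (List Char)), ls.length ≤ n →
      pvGoA key keyS ls false = pvFlat key keyS ls ∧
      pvGoA key keyS ls true = pvFlat key keyS (ls.dropWhile (pvFollows key keyS)) := by
  intro n
  induction n with
  | zero =>
    intro ls hls
    rw [List.length_eq_zero_iff.mp (Nat.le_zero.mp hls)]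
    rw [List.dropWhile_nil, pvFlat_nil]
    exact ⟨rfl, rfl⟩
  | succ n ih =>
    intro ls hls
    match ls with
    | [] => rw [List.dropWhile_nil, pvFlat_nil]; exact ⟨rfl, rfl⟩
    | l :: rest =>
      have hr : rest.length ≤ n := Nat.le_of_succ_le_succ hls
      have hd : (rest.dropWhile (pvFollows key keyS)).length ≤ n :=
        le_trans (List.length_dropWhile_le _ _) hr
      have part1 : pvGoA key keyS (l :: rest) false = pvFlat key keyS (l :: rest) := by
        rw [pvGoA, pvFlat_cons]
        by_cases ha : pvIsAttr key keyS l = true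
        · unfold pvIsAttr at ha
          simp only [Bool.false_and, ha, if_true]
          have := (ih rest hr).2
          unfold pvIsAttr at *
          simp [ha, pvFlat] at *
          exact this
        · unfold pvIsAttr at ha
          simp only [Bool.false_and, ha]
          have hsplit := List.takeWhile_append_dropWhile (p := pvFollows key keyS) (l := rest)
          have hrun := pvGoA_keepRun key keyS (rest.takeWhile (pvFollows key keyS))
            (rest.dropWhile (pvFollows key keyS))
            (fun l hl => List.mem_takeWhile_imp hl)
          rw [show pvGoA key keyS rest false
              = pvGoA key keyS (rest.takeWhile (pvFollows key keyS)
                  ++ rest.dropWhile (pvFollows key keyS)) false by rw [hsplit]]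
          rw [hrun, (ih _ hd).1]
          simp [ha, pvIsAttr]
      refine ⟨part1, ?_⟩
      by_cases hc : pvIsCont l = true
      · rw [pvGoA]
        simp only [hc, Bool.and_true, if_true]
        rw [(ih rest hr).2]
        by_cases ha : pvIsAttr key keyS l = true
        · have hf : pvFollows key keyS l = false := by unfold pvFollows; simp [ha]
          rw [List.dropWhile_cons_of_neg (by simp [hf]), pvFlat_cons, if_pos ha,
            List.nil_append]
        · have hf : pvFollows key keyS l = true := by
            unfold pvFollows; simp [hc, ha]
          rw [List.dropWhile_cons_of_pos hf]
      · have heq : pvGoA key keyS (l :: rest) true = pvGoA key keyS (l :: rest) false := by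
          rw [pvGoA, pvGoA]; simp [hc]
        have hf : pvFollows key keyS l = false := by unfold pvFollows; simp [hc]
        rw [heq, part1, List.dropWhile_cons_of_neg (by simp [hf])]

-- ===== VERDICT (by name: the statement is the Claim_ definition above) =====
theorem remove_meta_attr_spec : Claim_equal_remove_meta_attr := by
  intro content attr_name _
  unfold Spec_remove_meta_attr remove_meta_attr remove_meta_attr_alt
  simp only []
  rw [(pvGoA_eq_pvFlat _ _ _ _ (Nat.le_refl _)).1]
  rfl
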